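-- pv_equiv track=rewrite | github.com/yutendo0714/LIC-HPCM-WeConvene | archive/phase5/components/checkerboard_mask.py | get_anchor_positions
-- ===== SOURCE A (Python) =====
-- def get_anchor_positions(group_idx, H, W):
--     """
--     Get spatial positions for a given group
--
--     Useful for debugging and custom context gathering
--
--     Args:
--         group_idx: 0-3 for 4-group pattern, 0-1 for 2-group
--         H, W: Spatial dimensions
--     Returns:
--         positions: List of (h, w) tuples
--     """
--     positions = []
--
--     if group_idx == 0:  # (even, even)
--         for h in range(0, H, 2):
--             for w in range(0, W, 2):
--                 positions.append((h, w))
--     elif group_idx == 1:  # (even, odd)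
--         for h in range(0, H, 2):
--             for w in range(1, W, 2):
--                 positions.append((h, w))
--     elif group_idx == 2:  # (odd, even)
--         for h in range(1, H, 2):
--             for w in range(0, W, 2):
--                 positions.append((h, w))
--     elif group_idx == 3:  # (odd, odd)
--         for h in range(1, H, 2):
--             for w in range(1, W, 2):
--                 positions.append((h, w))
--
--     return positions
-- ===== SOURCE B (Python) =====
-- def get_anchor_positions(group_idx, H, W):
--     """
--     Get spatial positions for a given group
--
--     Returns:
--         positions: List of (h, w) tuples
--     """
--     if group_idx not in (0, 1, 2, 3):
--         return []
--     parity_h = group_idx // 2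
--     parity_w = group_idx % 2
--     positions = []
--     for h in range(H):
--         for w in range(W):
--             if h % 2 == parity_h and w % 2 == parity_w:
--                 positions.append((h, w))
--     return positions
-- ===== Notes on version B (the rewrite author's own statement) =====
-- stated objective: idiomatic
-- what changed: Replaces the four-way branch of strided double loops with one full-grid scan that filters cells by the parities derived arithmetically from group_idx (parity_h = group_idx // 2, parity_w = group_idx % 2).
import Mathlib
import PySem

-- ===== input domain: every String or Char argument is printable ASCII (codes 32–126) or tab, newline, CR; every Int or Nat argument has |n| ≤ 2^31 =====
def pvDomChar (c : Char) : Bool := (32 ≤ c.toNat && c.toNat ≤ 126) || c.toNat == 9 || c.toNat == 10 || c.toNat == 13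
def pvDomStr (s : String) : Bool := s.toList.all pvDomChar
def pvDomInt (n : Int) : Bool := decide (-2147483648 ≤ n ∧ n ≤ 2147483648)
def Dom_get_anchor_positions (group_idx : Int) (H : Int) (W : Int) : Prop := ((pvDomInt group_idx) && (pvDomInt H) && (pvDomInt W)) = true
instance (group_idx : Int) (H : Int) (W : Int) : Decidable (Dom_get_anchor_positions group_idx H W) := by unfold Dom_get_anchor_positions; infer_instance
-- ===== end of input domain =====

-- B replaces A's four-way branch of strided double loops with one full-grid scan that
-- filters each cell by the parities computed arithmetically from group_idx (idiomatic, same cost class).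

-- ===== PORT A =====
-- Literal transliteration: four branches, each a pair of nested strided `range` loops appending (h, w).
def get_anchor_positions (group_idx : Int) (H : Int) (W : Int) : List (Int × Int) :=
  let positions : List (Int × Int) := []
  if group_idx = 0 then
    (PySem.List.pyRange 0 H 2).foldl (fun positions h =>
      (PySem.List.pyRange 0 W 2).foldl (fun positions w => positions ++ [(h, w)]) positions) positions
  else if group_idx = 1 then
    (PySem.List.pyRange 0 H 2).foldl (fun positions h =>
      (PySem.List.pyRange 1 W 2).foldl (fun positions w => positions ++ [(h, w)]) positions) positions
  else if group_idx = 2 then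
    (PySem.List.pyRange 1 H 2).foldl (fun positions h =>
      (PySem.List.pyRange 0 W 2).foldl (fun positions w => positions ++ [(h, w)]) positions) positions
  else if group_idx = 3 then
    (PySem.List.pyRange 1 H 2).foldl (fun positions h =>
      (PySem.List.pyRange 1 W 2).foldl (fun positions w => positions ++ [(h, w)]) positions) positions
  else
    positions

-- ===== PORT B =====
-- Literal transliteration of Source B: guard on group_idx, derive the target parities, full scan with a parity filter.
def get_anchor_positions_alt (group_idx : Int) (H : Int) (W : Int) : List (Int × Int) :=
  if ¬(group_idx = 0 ∨ group_idx = 1 ∨ group_idx = 2 ∨ group_idx = 3) then []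
  else
    let parity_h := PySem.Int.floordiv group_idx 2
    let parity_w := PySem.Int.mod group_idx 2
    (PySem.List.pyRange 0 H 1).foldl (fun positions h =>
      (PySem.List.pyRange 0 W 1).foldl (fun positions w =>
        if PySem.Int.mod h 2 = parity_h ∧ PySem.Int.mod w 2 = parity_w then positions ++ [(h, w)]
        else positions) positions) []

-- ===== PRECONDITION & SPEC =====
def Spec_get_anchor_positions (group_idx : Int) (H : Int) (W : Int) (out : List (Int × Int)) : Prop := out = get_anchor_positions_alt group_idx H W
instance (group_idx : Int) (H : Int) (W : Int) (out : List (Int × Int)) : Decidable (Spec_get_anchor_positions group_idx H W out) := by unfold Spec_get_anchor_positions; infer_instance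

-- ===== CLAIM (what is proved, stated in full; the proofs are below) =====
def Claim_equal_get_anchor_positions : Prop := ∀ (group_idx : Int) (H : Int) (W : Int), Dom_get_anchor_positions group_idx H W → Spec_get_anchor_positions group_idx H W (get_anchor_positions group_idx H W)

-- ===== LEMMAS AND PROOFS =====

-- a stride-2 range starting at parity p ∈ {0,1} is the parity filter of the stride-1 range from 0
lemma pyRange_two_eq_filter (p N : Int) (hp : p = 0 ∨ p = 1) :
    PySem.List.pyRange p N 2 =
      (PySem.List.pyRange 0 N 1).filter (fun x => decide (PySem.Int.mod x 2 = p)) := by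
  have h2 : (0:Int) < 2 := by norm_num
  have hmod : ∀ x : Int, PySem.Int.mod x 2 = x % 2 := fun x => PySem.Int.mod_eq_emod_of_pos h2
  have plhs : (PySem.List.pyRange p N 2).Pairwise (· < ·) := by
    rw [PySem.List.pyRange_of_pos p N h2]
    exact (List.pairwise_lt_range).map _ (fun a b h => by omega)
  have prhs : ((PySem.List.pyRange 0 N 1).filter
      (fun x => decide (PySem.Int.mod x 2 = p))).Pairwise (· < ·) :=
    (PySem.List.pairwise_lt_pyRange_one 0 N).filter _
  refine List.eq_of_perm_of_sorted (fun a b _ _ h1 h2 => absurd h2 (lt_asymm h1)) plhs prhs ?_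
  rw [List.perm_ext_iff_of_nodup (plhs.imp ne_of_lt) (prhs.imp ne_of_lt)]
  intro x
  rw [PySem.List.mem_pyRange_iff_of_pos h2, List.mem_filter, PySem.List.mem_pyRange_one,
    decide_eq_true_iff, hmod]
  omega

lemma flatMap_singleton_eq_map {α β : Type} (f : α → β) (l : List α) :
    l.flatMap (fun x => [f x]) = l.map f := by
  induction l with
  | nil => rfl
  | cons a l ih => simp [ih]

-- distributing a flatMap over a pointwise if
lemma flatMap_ite_eq_flatMap_filter {α β : Type} (p : α → Bool) (g : α → List β) (l : List α) :
    l.flatMap (fun x => if p x then g x else []) = (l.filter p).flatMap g := by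
  induction l with
  | nil => rfl
  | cons a l ih =>
    by_cases h : p a = true <;> simp [h, ih]

-- the common computational core: both nested loops flatten to the same flatMap
lemma core_eq (ph pw H W : Int) (hph : ph = 0 ∨ ph = 1) (hpw : pw = 0 ∨ pw = 1) :
    (PySem.List.pyRange ph H 2).foldl (fun positions h =>
      (PySem.List.pyRange pw W 2).foldl (fun positions w => positions ++ [(h, w)]) positions) [] =
    (PySem.List.pyRange 0 H 1).foldl (fun positions h =>
      (PySem.List.pyRange 0 W 1).foldl (fun positions w =>
        if PySem.Int.mod h 2 = ph ∧ PySem.Int.mod w 2 = pw then positions ++ [(h, w)]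
        else positions) positions) [] := by
  have hL : (PySem.List.pyRange ph H 2).foldl (fun positions h =>
      (PySem.List.pyRange pw W 2).foldl (fun positions w => positions ++ [(h, w)]) positions) [] =
      (PySem.List.pyRange ph H 2).flatMap (fun h =>
        (PySem.List.pyRange pw W 2).map (fun w => (h, w))) := by
    rw [PySem.List.foldl_congr_mem (PySem.List.pyRange ph H 2)
      (fun positions h =>
        (PySem.List.pyRange pw W 2).foldl (fun positions w => positions ++ [(h, w)]) positions)
      (fun positions h => positions ++ (PySem.List.pyRange pw W 2).map (fun w => (h, w)))
      []
      (fun acc x _ => by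
        dsimp only
        rw [PySem.List.foldl_append_eq_flatMap, flatMap_singleton_eq_map]),
      PySem.List.foldl_append_eq_flatMap, List.nil_append]
  have hR : (PySem.List.pyRange 0 H 1).foldl (fun positions h =>
      (PySem.List.pyRange 0 W 1).foldl (fun positions w =>
        if PySem.Int.mod h 2 = ph ∧ PySem.Int.mod w 2 = pw then positions ++ [(h, w)]
        else positions) positions) [] =
      (PySem.List.pyRange 0 H 1).flatMap (fun h =>
        ((PySem.List.pyRange 0 W 1).filter
          (fun w => decide (PySem.Int.mod h 2 = ph ∧ PySem.Int.mod w 2 = pw))).map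
            (fun w => (h, w))) := by
    rw [PySem.List.foldl_congr_mem (PySem.List.pyRange 0 H 1)
      (fun positions h =>
        (PySem.List.pyRange 0 W 1).foldl (fun positions w =>
          if PySem.Int.mod h 2 = ph ∧ PySem.Int.mod w 2 = pw then positions ++ [(h, w)]
          else positions) positions)
      (fun positions h => positions ++
        ((PySem.List.pyRange 0 W 1).filter
          (fun w => decide (PySem.Int.mod h 2 = ph ∧ PySem.Int.mod w 2 = pw))).map
            (fun w => (h, w)))
      []
      (fun acc x _ => by
        dsimp only
        rw [PySem.List.foldl_append_ite]),
      PySem.List.foldl_append_eq_flatMap, List.nil_append]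
  rw [hL, hR]
  have hfun : (fun h => ((PySem.List.pyRange 0 W 1).filter
        (fun w => decide (PySem.Int.mod h 2 = ph ∧ PySem.Int.mod w 2 = pw))).map
          (fun w => (h, w)))
      = (fun h => if decide (PySem.Int.mod h 2 = ph) then
          ((PySem.List.pyRange 0 W 1).filter
            (fun w => decide (PySem.Int.mod w 2 = pw))).map (fun w => (h, w))
        else []) := by
    funext h
    by_cases hc : PySem.Int.mod h 2 = ph
    all_goals
      rw [PySem.Int.mod_eq_emod_of_pos (by norm_num)] at hc
      simp [hc]
  rw [hfun, flatMap_ite_eq_flatMap_filter (fun h => decide (PySem.Int.mod h 2 = ph))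
    (fun h => ((PySem.List.pyRange 0 W 1).filter
      (fun w => decide (PySem.Int.mod w 2 = pw))).map (fun w => (h, w))),
    ← pyRange_two_eq_filter ph H hph, ← pyRange_two_eq_filter pw W hpw]

theorem get_anchor_positions_spec_aux (group_idx H W : Int) :
    get_anchor_positions group_idx H W = get_anchor_positions_alt group_idx H W := by
  unfold get_anchor_positions get_anchor_positions_alt
  by_cases h0 : group_idx = 0
  · subst h0
    rw [if_pos rfl, if_neg (by norm_num)]
    exact core_eq 0 0 H W (Or.inl rfl) (Or.inl rfl)
  · by_cases h1 : group_idx = 1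
    · subst h1
      rw [if_neg (by norm_num), if_pos rfl, if_neg (by norm_num)]
      exact core_eq 0 1 H W (Or.inl rfl) (Or.inr rfl)
    · by_cases h2 : group_idx = 2
      · subst h2
        rw [if_neg (by norm_num), if_neg (by norm_num), if_pos rfl, if_neg (by norm_num)]
        exact core_eq 1 0 H W (Or.inr rfl) (Or.inl rfl)
      · by_cases h3 : group_idx = 3
        · subst h3
          rw [if_neg (by norm_num), if_neg (by norm_num), if_neg (by norm_num), if_pos rfl,
            if_neg (by norm_num)]
          exact core_eq 1 1 H W (Or.inr rfl) (Or.inr rfl)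
        · simp [h0, h1, h2, h3]

-- ===== VERDICT (by name: the statement is the Claim_ definition above) =====
theorem get_anchor_positions_spec : Claim_equal_get_anchor_positions := by
  intro g H W _
  exact get_anchor_positions_spec_aux g H W
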